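-- pv_equiv track=rewrite | github.com/jcolinpatrick/kryptos | archive/dragnet/dragnet.py | compute_col_start_positions
-- ===== SOURCE A (Python) =====
-- from typing import Any, Dict, List, Optional, Tuple
--
-- def compute_col_start_positions(
--     rank_to_col: List[int], col_len: List[int], width: int,
-- ) -> List[int]:
--     """Compute start position in IT for each column given the rank order."""
--     starts = [0] * width
--     cumul = 0
--     for r in range(width):
--         c = rank_to_col[r]
--         starts[c] = cumul
--         cumul += col_len[c]
--     return starts
-- ===== SOURCE B (Python) =====
-- def compute_col_start_positions(rank_to_col, col_len, width):
--     starts = [0] * width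
--     for r in range(width):
--         starts[rank_to_col[r]] = sum(col_len[rank_to_col[i]] for i in range(r))
--     return starts
-- ===== Notes on version B (the rewrite author's own statement) =====
-- stated objective: alternative
-- what changed: Drops the running accumulator entirely: each column's start is recomputed independently as the direct sum of the lengths of all earlier-ranked columns (naive quadratic recomputation instead of an incremental O(width) prefix accumulator).
import Mathlib
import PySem

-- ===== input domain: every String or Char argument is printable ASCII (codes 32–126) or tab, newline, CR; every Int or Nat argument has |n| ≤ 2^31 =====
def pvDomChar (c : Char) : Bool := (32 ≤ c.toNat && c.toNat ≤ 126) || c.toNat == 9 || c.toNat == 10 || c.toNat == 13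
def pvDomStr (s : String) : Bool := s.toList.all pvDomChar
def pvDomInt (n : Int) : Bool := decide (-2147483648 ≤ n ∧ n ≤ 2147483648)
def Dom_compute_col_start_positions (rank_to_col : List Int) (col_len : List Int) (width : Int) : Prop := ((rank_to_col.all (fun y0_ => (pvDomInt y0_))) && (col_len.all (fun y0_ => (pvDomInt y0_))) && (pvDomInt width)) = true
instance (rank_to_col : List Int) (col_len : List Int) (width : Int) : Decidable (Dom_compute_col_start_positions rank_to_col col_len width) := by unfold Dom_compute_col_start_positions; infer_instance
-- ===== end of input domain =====

-- B drops the running accumulator: each column's start is the direct sum of the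
-- lengths of all earlier-ranked columns (independent quadratic recomputation).

-- ===== PORT A =====
def compute_col_start_positions (rank_to_col : List Int) (col_len : List Int) (width : Int) : List Int :=
  -- starts = [0]*width; cumul = 0; for r in range(width): c = rank_to_col[r]; starts[c] = cumul; cumul += col_len[c]
  ((PySem.List.pyRange 0 width 1).foldl
    (fun (st : List Int × Int) r =>
      let c := PySem.List.pyGetD rank_to_col r 0   -- total form; Pre_ guarantees in range
      (PySem.List.pySetD st.1 c st.2, st.2 + PySem.List.pyGetD col_len c 0))
    (List.replicate width.toNat 0, 0)).1

-- ===== PORT B =====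
def compute_col_start_positions_alt (rank_to_col : List Int) (col_len : List Int) (width : Int) : List Int :=
  -- starts = [0]*width; for r in range(width): starts[rank_to_col[r]] = sum(col_len[rank_to_col[i]] for i in range(r))
  (PySem.List.pyRange 0 width 1).foldl
    (fun st r =>
      PySem.List.pySetD st (PySem.List.pyGetD rank_to_col r 0)
        (((PySem.List.pyRange 0 r 1).map
            (fun i => PySem.List.pyGetD col_len (PySem.List.pyGetD rank_to_col i 0) 0)).sum))
    (List.replicate width.toNat 0)

-- ===== PRECONDITION & SPEC =====
-- Pre_ excludes exactly the inputs on which Python A raises IndexError: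
-- range(width) must fit in rank_to_col, and each selected column must be a valid
-- index (Python range, allowing negatives) into both starts (length width) and col_len.
def Pre_compute_col_start_positions (rank_to_col : List Int) (col_len : List Int) (width : Int) : Prop :=
  width.toNat ≤ rank_to_col.length ∧
  ∀ c ∈ rank_to_col.take width.toNat,
    (-width ≤ c ∧ c < width) ∧ (-(col_len.length : Int) ≤ c ∧ c < (col_len.length : Int))
instance (rank_to_col : List Int) (col_len : List Int) (width : Int) : Decidable (Pre_compute_col_start_positions rank_to_col col_len width) := by unfold Pre_compute_col_start_positions; infer_instance

def pvWitness_compute_col_start_positions : List Int × List Int × Int := ([1, 0], [3, 4], 2)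

def Spec_compute_col_start_positions (rank_to_col : List Int) (col_len : List Int) (width : Int) (out : List Int) : Prop := out = compute_col_start_positions_alt rank_to_col col_len width
instance (rank_to_col : List Int) (col_len : List Int) (width : Int) (out : List Int) : Decidable (Spec_compute_col_start_positions rank_to_col col_len width out) := by unfold Spec_compute_col_start_positions; infer_instance

-- ===== CLAIM =====
def Claim_equal_compute_col_start_positions : Prop := ∀ (rank_to_col : List Int) (col_len : List Int) (width : Int), Dom_compute_col_start_positions rank_to_col col_len width → Pre_compute_col_start_positions rank_to_col col_len width → Spec_compute_col_start_positions rank_to_col col_len width (compute_col_start_positions rank_to_col col_len width)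

-- ===== LEMMAS AND PROOFS =====

theorem pv_range_cast (n : Nat) :
    PySem.List.pyRange 0 (Int.ofNat n) 1 = (List.range n).map (fun k => Int.ofNat k) := by
  rw [PySem.List.pyRange_one]
  simp only [Int.sub_zero, Int.ofNat_eq_natCast, Int.toNat_natCast, zero_add]

theorem pv_main (rank_to_col col_len : List Int) : ∀ (n : Nat) (init : List Int),
    ((List.range n).map (fun k => Int.ofNat k)).foldl
      (fun (st : List Int × Int) r =>
        (PySem.List.pySetD st.1 (PySem.List.pyGetD rank_to_col r 0) st.2,
         st.2 + PySem.List.pyGetD col_len (PySem.List.pyGetD rank_to_col r 0) 0)) (init, 0)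
    = (((List.range n).map (fun k => Int.ofNat k)).foldl
        (fun st r => PySem.List.pySetD st (PySem.List.pyGetD rank_to_col r 0)
          (((PySem.List.pyRange 0 r 1).map
              (fun i => PySem.List.pyGetD col_len (PySem.List.pyGetD rank_to_col i 0) 0)).sum)) init,
       ((List.range n).map
          (fun k => PySem.List.pyGetD col_len (PySem.List.pyGetD rank_to_col (Int.ofNat k) 0) 0)).sum) := by
  intro n
  induction n with
  | zero => intro init; simp only [List.range_zero, List.map_nil, List.foldl_nil, List.sum_nil]
  | succ n ih =>
      intro init
      rw [List.range_succ]
      simp only [List.map_append, List.foldl_append, List.sum_append, List.map_cons,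
        List.map_nil, List.foldl_cons, List.foldl_nil, List.sum_cons, List.sum_nil, add_zero]
      rw [ih init, pv_range_cast]
      simp only [List.map_map]
      rfl

-- ===== VERDICT =====
theorem compute_col_start_positions_spec : Claim_equal_compute_col_start_positions := by
  intro rank_to_col col_len width _ _
  unfold Spec_compute_col_start_positions
  unfold compute_col_start_positions compute_col_start_positions_alt
  have hr : PySem.List.pyRange 0 width 1
      = (List.range width.toNat).map (fun k => Int.ofNat k) := by
    rw [PySem.List.pyRange_one]
    simp only [Int.sub_zero, Int.ofNat_eq_natCast, zero_add]
  rw [hr, pv_main rank_to_col col_len width.toNat (List.replicate width.toNat 0)]
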